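-- pv_equiv track=rewrite | github.com/manisenkov/advent-of-code | py/adventofcode/year2023/day13.py | find_mirrors
-- ===== SOURCE A (Python) =====
-- def find_mirrors(pattern: list[list[str]], is_vertical: bool, is_smudged: bool) -> int:
--     numbers = []
--     if is_vertical:
--         for col in range(len(pattern[0])):
--             n = 0
--             for row in range(len(pattern)):
--                 if pattern[row][col] == "#":
--                     n += 2**row
--             numbers.append(n)
--     else:
--         for row in range(len(pattern)):
--             n = 0
--             for col in range(len(pattern[0])):
--                 if pattern[row][col] == "#":
--                     n += 2**col
--             numbers.append(n)
--     for i in range(1, len(numbers)):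
--         left = numbers[:i]
--         right = numbers[i:]
--         size = min(len(left), len(right))
--         left = left[-size:]
--         right = right[:size]
--         if is_smudged:
--             xored = [l ^ r for l, r in zip(left, right[::-1]) if l ^ r != 0]
--             if len(xored) == 1 and (xored[0] & (xored[0] - 1) == 0):
--                 return i
--         elif left == right[::-1]:
--             return i
--     return 0
-- ===== SOURCE B (Python) =====
-- def find_mirrors(pattern: list[list[str]], is_vertical: bool, is_smudged: bool) -> int:
--     # Work directly on the grid: compare mirrored lines cell by cell and
--     # count mismatches, instead of encoding lines as bitmask integers.
--     if is_vertical: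
--         lines = [[row[c] == "#" for row in pattern] for c in range(len(pattern[0]))]
--     else:
--         lines = [[row[c] == "#" for c in range(len(pattern[0]))] for row in pattern]
--     target = 1 if is_smudged else 0
--     for i in range(1, len(lines)):
--         size = min(i, len(lines) - i)
--         diff = sum(a != b
--                    for j in range(size)
--                    for a, b in zip(lines[i - 1 - j], lines[i + j]))
--         if diff == target:
--             return i
--     return 0
-- ===== Notes on version B (the rewrite author's own statement) =====
-- stated objective: alternative
-- what changed: B drops A's bitmask-integer encoding and XOR/power-of-two smudge test: it extracts rows/columns as boolean cell lists and, for each candidate mirror position, directly counts per-cell mismatches across mirrored line pairs, returning i when the count equals 1 (smudged) or 0 (clean).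
import Mathlib
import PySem

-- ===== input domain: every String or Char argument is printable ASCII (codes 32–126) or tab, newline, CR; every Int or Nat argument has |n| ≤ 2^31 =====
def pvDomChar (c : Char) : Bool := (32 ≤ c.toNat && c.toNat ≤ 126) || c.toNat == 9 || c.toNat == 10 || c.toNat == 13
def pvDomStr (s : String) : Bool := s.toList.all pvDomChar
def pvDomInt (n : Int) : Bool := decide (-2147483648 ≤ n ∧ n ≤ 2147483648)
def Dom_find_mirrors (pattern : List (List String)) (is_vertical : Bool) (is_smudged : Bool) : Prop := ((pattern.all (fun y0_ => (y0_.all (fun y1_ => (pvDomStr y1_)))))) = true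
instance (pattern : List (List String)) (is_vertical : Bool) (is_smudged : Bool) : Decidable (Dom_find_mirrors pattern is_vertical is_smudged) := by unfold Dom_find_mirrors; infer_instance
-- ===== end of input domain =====

-- B drops A's bitmask-integer encoding and instead compares mirrored grid lines
-- cell by cell, counting mismatches directly (objective: alternative, same cost).

-- ===== PORT A =====
-- A's `numbers`: Python ints that are sums of distinct powers of two, hence
-- nonnegative; kept as Nat (exact on these values, incl. ^^^ and &&&).
def pvNumbersA (pattern : List (List String)) (is_vertical : Bool) : List Nat :=
  if is_vertical then
    -- for col in range(len(pattern[0])): n = 0; for row in range(len(pattern)): ...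
    (List.range (pattern.headD []).length).map (fun col =>
      (List.range pattern.length).foldl (fun n row =>
        if (pattern.getD row []).getD col "" == "#" then n + 2 ^ row else n) 0)
  else
    (List.range pattern.length).map (fun row =>
      (List.range (pattern.headD []).length).foldl (fun n col =>
        if (pattern.getD row []).getD col "" == "#" then n + 2 ^ col else n) 0)

-- body of A's `for i in range(1, len(numbers))` loop; slices are exact here:
-- numbers[:i] = take i, numbers[i:] = drop i, left[-size:] = drop (len-size)
-- (1 ≤ size ≤ len(left)), right[:size] = take size, [::-1] = reverse.
def pvCheckA (numbers : List Nat) (is_smudged : Bool) (i : Nat) : Bool :=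
  let left := numbers.take i
  let right := numbers.drop i
  let size := min left.length right.length
  let left := left.drop (left.length - size)
  let right := right.take size
  if is_smudged then
    let xored := ((left.zip right.reverse).map (fun p => p.1 ^^^ p.2)).filter (fun x => x ≠ 0)
    xored.length == 1 && ((xored.headD 0) &&& ((xored.headD 0) - 1) == 0)
  else
    left == right.reverse

def find_mirrors (pattern : List (List String)) (is_vertical : Bool) (is_smudged : Bool) : Int :=
  let numbers := pvNumbersA pattern is_vertical
  match (List.range' 1 (numbers.length - 1)).find? (fun i => pvCheckA numbers is_smudged i) with
  | some i => (i : Int)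
  | none => 0

-- ===== PORT B =====
def pvLinesB (pattern : List (List String)) (is_vertical : Bool) : List (List Bool) :=
  if is_vertical then
    (List.range (pattern.headD []).length).map (fun c =>
      pattern.map (fun row => row.getD c "" == "#"))
  else
    pattern.map (fun row =>
      (List.range (pattern.headD []).length).map (fun c => row.getD c "" == "#"))

-- sum(a != b for j in range(size) for a, b in zip(lines[i-1-j], lines[i+j]))
def pvDiffB (lines : List (List Bool)) (i : Nat) (size : Nat) : Nat :=
  ((List.range size).map (fun j =>
    ((lines.getD (i - 1 - j) []).zip (lines.getD (i + j) [])).countP (fun p => p.1 != p.2))).sum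

def find_mirrors_alt (pattern : List (List String)) (is_vertical : Bool) (is_smudged : Bool) : Int :=
  let lines := pvLinesB pattern is_vertical
  let target : Nat := if is_smudged then 1 else 0
  match (List.range' 1 (lines.length - 1)).find? (fun i =>
      pvDiffB lines i (min i (lines.length - i)) == target) with
  | some i => (i : Int)
  | none => 0

-- ===== PRECONDITION & SPEC =====
-- Pre_ excludes exactly the inputs where Python A raises IndexError: an empty
-- pattern (pattern[0]) or a row shorter than the first row (pattern[row][col]).
def Pre_find_mirrors (pattern : List (List String)) (is_vertical : Bool) (is_smudged : Bool) : Prop :=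
  pattern ≠ [] ∧ ∀ row ∈ pattern, (pattern.headD []).length ≤ row.length
instance (pattern : List (List String)) (is_vertical : Bool) (is_smudged : Bool) : Decidable (Pre_find_mirrors pattern is_vertical is_smudged) := by unfold Pre_find_mirrors; infer_instance

def pvWitness_find_mirrors : List (List String) × Bool × Bool := ([[".", "#"], [".", "#"]], true, false)

def Spec_find_mirrors (pattern : List (List String)) (is_vertical : Bool) (is_smudged : Bool) (out : Int) : Prop := out = find_mirrors_alt pattern is_vertical is_smudged
instance (pattern : List (List String)) (is_vertical : Bool) (is_smudged : Bool) (out : Int) : Decidable (Spec_find_mirrors pattern is_vertical is_smudged out) := by unfold Spec_find_mirrors; infer_instance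

-- ===== CLAIM (what is proved, stated in full; the proofs are below) =====
def Claim_equal_find_mirrors : Prop := ∀ (pattern : List (List String)) (is_vertical : Bool) (is_smudged : Bool), Dom_find_mirrors pattern is_vertical is_smudged → Pre_find_mirrors pattern is_vertical is_smudged → Spec_find_mirrors pattern is_vertical is_smudged (find_mirrors pattern is_vertical is_smudged)

-- ===== LEMMAS AND PROOFS =====

-- little-endian bit encoding of a line of cells, the value A's inner loops build
def encBits : List Bool → Nat
  | [] => 0
  | b :: bs => Nat.bit b (encBits bs)

-- number of mismatching cells between two lines
def misN (u v : List Bool) : Nat := (u.zip v).countP (fun p => p.1 != p.2)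

theorem encBits_nil : encBits [] = 0 := rfl
theorem encBits_cons (b : Bool) (bs : List Bool) : encBits (b :: bs) = Nat.bit b (encBits bs) := rfl

theorem misN_nil (v : List Bool) : misN [] v = 0 := by cases v <;> rfl

theorem misN_cons (a b : Bool) (u v : List Bool) :
    misN (a :: u) (b :: v) = misN u v + (if a != b then 1 else 0) := by
  simp [misN, List.countP_cons]

theorem bit_inj (a b : Bool) (m n : Nat) : Nat.bit a m = Nat.bit b n ↔ (a = b ∧ m = n) := by
  cases a <;> cases b <;> simp [Nat.bit_val] <;> omega

theorem enc_eq_iff (u : List Bool) : ∀ v : List Bool, u.length = v.length →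
    (encBits u = encBits v ↔ misN u v = 0) := by
  induction u with
  | nil => intro v h; cases v <;> simp_all [misN_nil, encBits_nil]
  | cons a u ih =>
    intro v h
    cases v with
    | nil => simp at h
    | cons b v =>
      simp only [encBits_cons, misN_cons, bit_inj]
      rw [ih v (by simpa using h)]
      cases a <;> cases b <;> simp

theorem enc_xor (u : List Bool) : ∀ v : List Bool, u.length = v.length →
    encBits u ^^^ encBits v = encBits (u.zipWith (fun a b => a != b) v) := by
  induction u with
  | nil => intro v h; cases v <;> simp_all [encBits_nil]
  | cons a u ih =>
    intro v h
    cases v with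
    | nil => simp at h
    | cons b v =>
      simp only [encBits_cons, List.zipWith_cons_cons, Nat.xor_bit]
      rw [ih v (by simpa using h)]

theorem misN_eq_count (u : List Bool) : ∀ v : List Bool,
    misN u v = (u.zipWith (fun a b => a != b) v).count true := by
  induction u with
  | nil => intro v; cases v <;> rfl
  | cons a u ih =>
    intro v
    cases v with
    | nil => rfl
    | cons b v =>
      simp only [misN_cons, List.zipWith_cons_cons, List.count_cons, ih]
      cases a <;> cases b <;> simp

theorem enc_zero_iff (w : List Bool) : encBits w = 0 ↔ w.count true = 0 := by
  induction w with
  | nil => simp [encBits_nil]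
  | cons b bs ih =>
    simp only [encBits_cons, List.count_cons, Nat.bit_val]
    cases b <;> simp_all

theorem enc_pow_iff (w : List Bool) :
    (encBits w ≠ 0 ∧ encBits w &&& (encBits w - 1) = 0) ↔ w.count true = 1 := by
  induction w with
  | nil => simp [encBits_nil]
  | cons b bs ih =>
    rcases b with _ | _
    · -- b = false : encBits = bit false e = 2e
      have hc : List.count true (false :: bs) = List.count true bs := by simp
      rw [encBits_cons, hc]
      by_cases he : encBits bs = 0
      · simp [he, Nat.bit_val, (enc_zero_iff bs).mp he]
      · have h1 : Nat.bit false (encBits bs) - 1 = Nat.bit true (encBits bs - 1) := by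
          simp only [Nat.bit_val, Bool.toNat_false, Bool.toNat_true]; omega
        have h2 : Nat.bit false (encBits bs) &&& Nat.bit true (encBits bs - 1)
            = Nat.bit false (encBits bs &&& (encBits bs - 1)) := Nat.land_bit ..
        rw [h1, h2]
        have h3 : Nat.bit false (encBits bs) ≠ 0 := by
          simp only [Nat.bit_val, Bool.toNat_false]; omega
        have h4 : Nat.bit false (encBits bs &&& (encBits bs - 1)) = 0
            ↔ encBits bs &&& (encBits bs - 1) = 0 := by
          simp only [Nat.bit_val, Bool.toNat_false]; omega
        constructor
        · rintro ⟨-, hh⟩; exact ih.mp ⟨he, h4.mp hh⟩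
        · intro hh; exact ⟨h3, h4.mpr (ih.mpr hh).2⟩
    · -- b = true : encBits = 2e + 1
      have hc : List.count true (true :: bs) = List.count true bs + 1 := by simp
      rw [encBits_cons, hc]
      have h1 : Nat.bit true (encBits bs) - 1 = Nat.bit false (encBits bs) := by
        simp only [Nat.bit_val, Bool.toNat_false, Bool.toNat_true]; omega
      have h2 : Nat.bit true (encBits bs) &&& Nat.bit false (encBits bs)
          = Nat.bit false (encBits bs &&& encBits bs) := Nat.land_bit ..
      rw [h1, h2, Nat.and_self]
      have h3 : Nat.bit true (encBits bs) ≠ 0 := by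
        simp only [Nat.bit_val, Bool.toNat_true]; omega
      have h4 : Nat.bit false (encBits bs) = 0 ↔ encBits bs = 0 := by
        simp only [Nat.bit_val, Bool.toNat_false]; omega
      constructor
      · rintro ⟨-, hh⟩
        have := (enc_zero_iff bs).mp (h4.mp hh); omega
      · intro hh
        have hz : List.count true bs = 0 := by omega
        exact ⟨h3, h4.mpr ((enc_zero_iff bs).mpr hz)⟩

-- per-pair packaging
theorem pair_zero (u v : List Bool) (h : u.length = v.length) :
    (encBits u ^^^ encBits v = 0 ↔ misN u v = 0) := by
  rw [Nat.xor_eq_zero_iff]; exact enc_eq_iff u v h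

theorem pair_one (u v : List Bool) (h : u.length = v.length) :
    ((encBits u ^^^ encBits v ≠ 0 ∧
      (encBits u ^^^ encBits v) &&& ((encBits u ^^^ encBits v) - 1) = 0) ↔ misN u v = 1) := by
  rw [enc_xor u v h, enc_pow_iff, misN_eq_count]

-- encBits of a line built by the foldl in A
theorem encBits_append_singleton (l : List Bool) (b : Bool) :
    encBits (l ++ [b]) = encBits l + (if b then 2 ^ l.length else 0) := by
  induction l with
  | nil => cases b <;> simp [encBits, Nat.bit_val]
  | cons a l ih =>
    simp only [List.cons_append, encBits_cons, ih, Nat.bit_val, List.length_cons]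
    cases a <;> cases b <;> simp [pow_succ] <;> ring

theorem foldl_encBits (f : Nat → Bool) (m : Nat) :
    (List.range m).foldl (fun n k => if f k then n + 2 ^ k else n) 0
      = encBits ((List.range m).map f) := by
  induction m with
  | zero => rfl
  | succ m ih =>
    rw [List.range_succ, List.foldl_append, List.map_append]
    have hmap : List.map f [m] = [f m] := rfl
    rw [hmap, encBits_append_singleton]
    simp only [List.foldl_cons, List.foldl_nil, ih, List.length_map, List.length_range]
    split <;> simp

theorem map_range_getD {α β : Type} (l : List α) (d : α) (g : α → β) :
    (List.range l.length).map (fun i => g (l.getD i d)) = l.map g := by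
  induction l with
  | nil => rfl
  | cons x xs ih =>
    rw [List.length_cons, List.range_succ_eq_map]
    simp only [List.map_cons, List.map_map, Function.comp_def, List.getD_cons_zero,
      List.getD_cons_succ]
    rw [ih]

-- A's numbers are exactly encBits of B's lines
theorem numbers_eq_map_enc (pattern : List (List String)) (is_vertical : Bool) :
    pvNumbersA pattern is_vertical = (pvLinesB pattern is_vertical).map encBits := by
  cases is_vertical with
  | true =>
    simp only [pvNumbersA, pvLinesB, reduceIte, List.map_map]
    refine List.map_congr_left (fun col _ => ?_)
    rw [foldl_encBits (fun row => (pattern.getD row []).getD col "" == "#")]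
    rw [map_range_getD pattern [] (fun row => row.getD col "" == "#")]
    rfl
  | false =>
    simp only [pvNumbersA, pvLinesB, Bool.false_eq_true, if_false, List.map_map,
      Function.comp_def]
    rw [← map_range_getD pattern [] (fun row =>
      encBits ((List.range (pattern.headD []).length).map (fun c => row.getD c "" == "#")))]
    refine List.map_congr_left (fun row _ => ?_)
    rw [foldl_encBits (fun col => (pattern.getD row []).getD col "" == "#")]

-- all of B's lines have the same length
theorem lines_length_eq (pattern : List (List String)) (is_vertical : Bool) :
    ∀ u ∈ pvLinesB pattern is_vertical, ∀ v ∈ pvLinesB pattern is_vertical,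
      u.length = v.length := by
  cases is_vertical <;> intro u hu v hv <;> simp [pvLinesB] at hu hv
  · obtain ⟨_, _, rfl⟩ := hu; obtain ⟨_, _, rfl⟩ := hv; simp
  · obtain ⟨_, _, rfl⟩ := hu; obtain ⟨_, _, rfl⟩ := hv; simp

-- generic: A's filtered-xor test vs the mismatch sum, over a list of (xor, mis) pairs
theorem filter_empty_iff_sum_zero (P : List (Nat × Nat))
    (h : ∀ p ∈ P, (p.1 = 0 ↔ p.2 = 0)) :
    ((P.map Prod.fst).filter (fun x => x ≠ 0) = [] ↔ (P.map Prod.snd).sum = 0) := by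
  induction P with
  | nil => simp
  | cons q P ih =>
    have hq := h q (by simp)
    have ihh := ih (fun p hp => h p (by simp [hp]))
    simp only [List.map_cons, List.filter_cons, List.sum_cons]
    by_cases hz : q.1 = 0
    · rw [if_neg (by simp [hz]), hq.mp hz, Nat.zero_add]
      exact ihh
    · have hnz : q.2 ≠ 0 := fun h2 => hz (hq.mpr h2)
      rw [if_pos (by simpa using hz)]
      exact iff_of_false (by simp) (by omega)

theorem smudge_iff_sum_one (P : List (Nat × Nat))
    (h : ∀ p ∈ P, (p.1 = 0 ↔ p.2 = 0) ∧ ((p.1 ≠ 0 ∧ p.1 &&& (p.1 - 1) = 0) ↔ p.2 = 1)) :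
    (((P.map Prod.fst).filter (fun x => x ≠ 0)).length = 1 ∧
      ((P.map Prod.fst).filter (fun x => x ≠ 0)).headD 0 &&&
        (((P.map Prod.fst).filter (fun x => x ≠ 0)).headD 0 - 1) = 0)
    ↔ (P.map Prod.snd).sum = 1 := by
  induction P with
  | nil => simp
  | cons q P ih =>
    have hq := h q (by simp)
    have ihh := ih (fun p hp => h p (by simp [hp]))
    have hrest := filter_empty_iff_sum_zero P (fun p hp => (h p (by simp [hp])).1)
    simp only [List.map_cons, List.filter_cons, List.sum_cons]
    by_cases hz : q.1 = 0
    · rw [if_neg (by simp [hz]), hq.1.mp hz, Nat.zero_add]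
      exact ihh
    · rw [if_pos (by simpa using hz)]
      by_cases hpow : q.1 &&& (q.1 - 1) = 0
      · have hm1 : q.2 = 1 := hq.2.mp ⟨hz, hpow⟩
        rw [hm1]
        constructor
        · rintro ⟨hlen, -⟩
          have hnil : (P.map Prod.fst).filter (fun x => x ≠ 0) = [] := by
            rcases hh : (P.map Prod.fst).filter (fun x => x ≠ 0) with _ | ⟨a, t⟩
            · exact hh
            · rw [hh] at hlen; simp at hlen
          have := hrest.mp hnil
          omega
        · intro hs
          have hs0 : (P.map Prod.snd).sum = 0 := by omega
          have hnil := hrest.mpr hs0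
          rw [hnil]
          exact ⟨rfl, by simpa using hpow⟩
      · have hm0 : q.2 ≠ 0 := fun h0 => hz (hq.1.mpr h0)
        have hm : q.2 ≠ 1 := fun h1 => hpow (hq.2.mpr h1).2
        refine iff_of_false ?_ (by omega)
        rintro ⟨hlen, hhd⟩
        exact hpow (by simpa using hhd)

-- sum over a reflected range
theorem sum_map_range_reflect (f : Nat → Nat) (n : Nat) :
    ((List.range n).map (fun j => f (n - 1 - j))).sum = ((List.range n).map f).sum := by
  have h1 : (List.range n).reverse = (List.range n).map (fun i => n - 1 - i) := by
    rw [List.range_eq_range', List.reverse_range']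
    simp [List.range_eq_range']
  calc ((List.range n).map (fun j => f (n - 1 - j))).sum
      = (((List.range n).reverse).map f).sum := by rw [h1, List.map_map]; rfl
    _ = (((List.range n).map f).reverse).sum := by rw [List.map_reverse]
    _ = ((List.range n).map f).sum := List.sum_reverse _

theorem find?_congr_list {α : Type} (p q : α → Bool) (l : List α)
    (h : ∀ x ∈ l, p x = q x) : l.find? p = l.find? q := by
  induction l with
  | nil => rfl
  | cons a l ih =>
    simp only [List.find?_cons, h a (by simp)]
    cases q a <;> simp [ih (fun x hx => h x (by simp [hx]))]

-- B's sum of mismatches, written over A's pair order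
theorem diffB_reindex (ls : List (List Bool)) (i : Nat) (size : Nat)
    (hsz : 1 ≤ size) (hsi : size ≤ i) :
    pvDiffB ls i size
      = ((List.range size).map (fun j =>
          misN (ls.getD (i - size + j) []) (ls.getD (i + size - 1 - j) []))).sum := by
  unfold pvDiffB
  rw [← sum_map_range_reflect (fun j =>
    misN (ls.getD (i - size + j) []) (ls.getD (i + size - 1 - j) [])) size]
  refine congrArg List.sum (List.map_congr_left (fun j hj => ?_))
  have hj' : j < size := List.mem_range.mp hj
  have e1 : i - size + (size - 1 - j) = i - 1 - j := by omega
  have e2 : i + size - 1 - (size - 1 - j) = i + j := by omega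
  rw [e1, e2]
  rfl

theorem getD_mem (ls : List (List Bool)) (k : Nat) (hk : k < ls.length) :
    ls.getD k [] ∈ ls := by
  rw [List.getD_eq_getElem ls [] hk]
  exact List.getElem_mem hk

-- the per-candidate tests agree
theorem checkA_eq_diff (ls : List (List Bool)) (is_smudged : Bool) (i : Nat)
    (hlen : ∀ u ∈ ls, ∀ v ∈ ls, u.length = v.length)
    (h1 : 1 ≤ i) (h2 : i < ls.length) :
    pvCheckA (ls.map encBits) is_smudged i
      = (pvDiffB ls i (min i (ls.length - i)) == (if is_smudged then 1 else 0)) := by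
  have hN : (ls.map encBits).length = ls.length := List.length_map ..
  set N := ls.length with hNdef
  set size := min i (N - i) with hsdef
  have hsz : 1 ≤ size := by omega
  have hsi : size ≤ i := by omega
  have hsN : size ≤ N - i := by omega
  have hL1 : ((ls.map encBits).take i).drop (i - size)
      = (List.range size).map (fun j => encBits (ls.getD (i - size + j) [])) := by
    apply List.ext_getElem
    · simp only [List.length_drop, List.length_take, List.length_map, List.length_range]
      omega
    · intro j hj1 hj2
      simp only [List.getElem_drop, List.getElem_take, List.getElem_map, List.getElem_range]
      rw [List.getD_eq_getElem ls [] (by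
        simp only [List.length_drop, List.length_take, List.length_map] at hj1
        omega)]
  have hL2 : (((ls.map encBits).drop i).take size).reverse
      = (List.range size).map (fun j => encBits (ls.getD (i + size - 1 - j) [])) := by
    apply List.ext_getElem
    · simp only [List.length_reverse, List.length_take, List.length_drop, List.length_map,
        List.length_range]
      omega
    · intro j hj1 hj2
      simp only [List.length_reverse, List.length_take, List.length_drop, List.length_map,
        List.length_range] at hj1 hj2
      simp only [List.getElem_reverse, List.getElem_take, List.getElem_drop, List.getElem_map,
        List.getElem_range, List.length_take, List.length_drop, List.length_map]
      have hb : i + size - 1 - j < ls.length := by omega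
      rw [List.getD_eq_getElem ls [] hb]
      simp only [show i + (min size (ls.length - i) - 1 - j) = i + size - 1 - j from by omega]
  have hpair : ∀ j < size,
      (ls.getD (i - size + j) []).length = (ls.getD (i + size - 1 - j) []).length := by
    intro j hj
    exact hlen _ (getD_mem ls _ (by omega)) _ (getD_mem ls _ (by omega))
  cases is_smudged with
  | false =>
    simp only [pvCheckA, Bool.false_eq_true, if_false, List.length_take, List.length_drop,
      List.length_map]
    rw [show min i ls.length = i by omega, show min i (ls.length - i) = size by omega,
        hL1, hL2, diffB_reindex ls i size hsz hsi]
    rw [Bool.eq_iff_iff, beq_iff_eq, beq_iff_eq, List.map_inj_left, List.sum_eq_zero_iff]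
    constructor
    · intro hmapeq x hx
      simp only [List.mem_map, List.mem_range] at hx
      obtain ⟨j, hj, rfl⟩ := hx
      exact (enc_eq_iff _ _ (hpair j hj)).mp (hmapeq j (List.mem_range.mpr hj))
    · intro hall j hj
      have hj' := List.mem_range.mp hj
      exact (enc_eq_iff _ _ (hpair j hj')).mpr
        (hall _ (List.mem_map.mpr ⟨j, List.mem_range.mpr hj', rfl⟩))
  | true =>
    simp only [pvCheckA, if_true, List.length_take, List.length_drop, List.length_map]
    rw [show min i ls.length = i by omega, show min i (ls.length - i) = size by omega,
        hL1, hL2, List.zip_map', diffB_reindex ls i size hsz hsi]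
    rw [Bool.eq_iff_iff, Bool.and_eq_true, beq_iff_eq, beq_iff_eq, beq_iff_eq]
    have hQ : ∀ p ∈ (List.range size).map (fun j =>
        (encBits (ls.getD (i - size + j) []) ^^^ encBits (ls.getD (i + size - 1 - j) []),
         misN (ls.getD (i - size + j) []) (ls.getD (i + size - 1 - j) []))),
        (p.1 = 0 ↔ p.2 = 0) ∧ ((p.1 ≠ 0 ∧ p.1 &&& (p.1 - 1) = 0) ↔ p.2 = 1) := by
      intro p hp
      simp only [List.mem_map, List.mem_range] at hp
      obtain ⟨j, hj, rfl⟩ := hp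
      exact ⟨pair_zero _ _ (hpair j hj), pair_one _ _ (hpair j hj)⟩
    have hmain := smudge_iff_sum_one _ hQ
    simp only [List.map_map, Function.comp_def] at hmain
    simp only [List.map_map, Function.comp_def]
    exact hmain

theorem check_eq (pattern : List (List String)) (is_vertical is_smudged : Bool)
    (i : Nat) (h1 : 1 ≤ i) (h2 : i < (pvLinesB pattern is_vertical).length) :
    pvCheckA (pvNumbersA pattern is_vertical) is_smudged i
      = (pvDiffB (pvLinesB pattern is_vertical) i
          (min i ((pvLinesB pattern is_vertical).length - i)) ==
          (if is_smudged then 1 else 0)) := by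
  rw [numbers_eq_map_enc]
  exact checkA_eq_diff _ is_smudged i (lines_length_eq pattern is_vertical) h1 h2

-- ===== VERDICT (by name: the statement is the Claim_ definition above) =====
theorem find_mirrors_spec : Claim_equal_find_mirrors := by
  intro pattern is_vertical is_smudged _ _
  unfold Spec_find_mirrors
  simp only [find_mirrors, find_mirrors_alt]
  rw [numbers_eq_map_enc, List.length_map]
  have hp : ∀ x ∈ List.range' 1 ((pvLinesB pattern is_vertical).length - 1),
      pvCheckA (List.map encBits (pvLinesB pattern is_vertical)) is_smudged x
        = (pvDiffB (pvLinesB pattern is_vertical) x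
            (min x ((pvLinesB pattern is_vertical).length - x)) ==
            (if is_smudged then 1 else 0)) := by
    intro x hx
    obtain ⟨k, hk, rfl⟩ := List.mem_range'.mp hx
    rw [← numbers_eq_map_enc]
    exact check_eq pattern is_vertical is_smudged _ (by omega) (by omega)
  rw [find?_congr_list _ _ _ hp]
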